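-- pv_equiv track=rewrite | github.com/saj8723-lgtm/ai-life-status | tools/trend_post_generator.py | _pick_interesting
-- ===== SOURCE A (Python) =====
-- def _pick_interesting(sv: dict) -> tuple:
--     """??? > 超高値(≥1000) > 超低値(≤30) > 最大値 の優先度でstatを選ぶ"""
--     for k, s in sv.items():
--         if s["value"] == -1:
--             return k, s
--     highs = {k: s for k, s in sv.items() if isinstance(s["value"], int) and s["value"] >= 1000}
--     if highs:
--         k = max(highs, key=lambda k: highs[k]["value"])
--         return k, highs[k]
--     lows = {k: s for k, s in sv.items() if isinstance(s["value"], int) and s["value"] <= 30}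
--     if lows:
--         k = min(lows, key=lambda k: lows[k]["value"])
--         return k, lows[k]
--     k = max(sv, key=lambda k: sv[k]["value"])
--     return k, sv[k]
-- ===== SOURCE B (Python) =====
-- def _pick_interesting(sv: dict) -> tuple:
--     """Single pass: return the first ??? stat immediately; otherwise maintain running
--     high (>=1000, strict max), low (<=30, strict min) and global strict-max candidates."""
--     high = low = best = None
--     hv = lv = bv = 0
--     for k, s in sv.items():
--         v = s["value"]
--         if v == -1:
--             return k, s
--         if isinstance(v, int):
--             if v >= 1000:
--                 if high is None or v > hv:
--                     high, hv = (k, s), v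
--             elif v <= 30:
--                 if low is None or v < lv:
--                     low, lv = (k, s), v
--         if best is None or v > bv:
--             best, bv = (k, s), v
--     if high is not None:
--         return high
--     if low is not None:
--         return low
--     return best
-- ===== Notes on version B (the rewrite author's own statement) =====
-- stated objective: alternative
-- what changed: Replaced A's up-to-four separate passes (early -1 scan, two filtered dict comprehensions with max/min over them, and a final global max) by one combined loop that maintains three running candidates (high, low, global max) with strict-comparison first-wins updates.
import Mathlib
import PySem

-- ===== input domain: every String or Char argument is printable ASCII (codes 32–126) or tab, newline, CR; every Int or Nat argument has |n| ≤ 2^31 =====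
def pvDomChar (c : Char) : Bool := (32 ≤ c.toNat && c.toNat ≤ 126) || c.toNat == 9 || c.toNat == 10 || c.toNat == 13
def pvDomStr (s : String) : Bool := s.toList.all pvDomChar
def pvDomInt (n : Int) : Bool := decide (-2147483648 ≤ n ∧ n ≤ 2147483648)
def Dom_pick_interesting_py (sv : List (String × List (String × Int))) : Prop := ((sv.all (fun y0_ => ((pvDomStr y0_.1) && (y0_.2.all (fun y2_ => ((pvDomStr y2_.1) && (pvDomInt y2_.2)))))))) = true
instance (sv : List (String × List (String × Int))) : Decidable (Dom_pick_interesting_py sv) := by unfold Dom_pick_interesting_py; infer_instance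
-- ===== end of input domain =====

-- B replaces A's multiple passes (early ??? scan, two filtered comprehensions with max/min, global max)
-- by one loop maintaining running high/low/global-max candidates (same O(n), no intermediate dicts).


-- a stat dict entry: name paired with its fields-dict
abbrev pvP : Type := String × List (String × Int)

-- s["value"]  (Pre_ guarantees the key is present, so the default is never the result)
def pvGetV (s : List (String × Int)) : Int := PySem.Dict.getD (PySem.Dict.mk s) "value" 0

-- ===== PORT A =====
-- k = max(d, key=lambda k: d[k]["value"]); return k, d[k]  — Python max keeps the FIRST maximum
def pvMaxStep (b p : pvP) : pvP := if pvGetV b.2 < pvGetV p.2 then p else b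
def pvMinStep (b p : pvP) : pvP := if pvGetV p.2 < pvGetV b.2 then p else b
def pvArgMax (l : List pvP) : pvP :=
  match l with
  | [] => ("", [])          -- unreachable under Pre_ (Python max raises ValueError on an empty dict)
  | h :: t => t.foldl pvMaxStep h
def pvArgMin (l : List pvP) : pvP :=
  match l with
  | [] => ("", [])
  | h :: t => t.foldl pvMinStep h

def pick_interesting_py (sv : List (String × List (String × Int))) : String × (List (String × Int)) :=
  -- for k, s in sv.items(): if s["value"] == -1: return k, s
  match sv.find? (fun p => pvGetV p.2 == -1) with
  | some p => p
  | none =>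
    -- values are Int here, so Python's isinstance(s["value"], int) is always true and is dropped
    let highs := sv.filter (fun p => decide (1000 ≤ pvGetV p.2))
    if highs ≠ [] then pvArgMax highs
    else
      let lows := sv.filter (fun p => decide (pvGetV p.2 ≤ 30))
      if lows ≠ [] then pvArgMin lows
      else pvArgMax sv

-- ===== PORT B =====
-- one candidate = (option pair, its cached value) as in Source B's (high, hv) etc.
def pvUpdMax (c : Option pvP × Int) (p : pvP) (v : Int) : Option pvP × Int :=
  if c.1.isNone || decide (c.2 < v) then (some p, v) else c
def pvUpdMin (c : Option pvP × Int) (p : pvP) (v : Int) : Option pvP × Int :=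
  if c.1.isNone || decide (v < c.2) then (some p, v) else c

-- one loop-body update per candidate (the three if-blocks of Source B; values are Int, isinstance dropped)
def pvStepHi (c : Option pvP × Int) (p : pvP) : Option pvP × Int :=
  if 1000 ≤ pvGetV p.2 then pvUpdMax c p (pvGetV p.2) else c
def pvStepLo (c : Option pvP × Int) (p : pvP) : Option pvP × Int :=
  if 1000 ≤ pvGetV p.2 then c else if pvGetV p.2 ≤ 30 then pvUpdMin c p (pvGetV p.2) else c
def pvStepBe (c : Option pvP × Int) (p : pvP) : Option pvP × Int :=
  pvUpdMax c p (pvGetV p.2)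

-- the returns after the loop: high, else low, else best
def pvFinish (hi lo be : Option pvP × Int) : pvP :=
  match hi.1 with
  | some h => h
  | none => match lo.1 with
    | some x => x
    | none => match be.1 with
      | some x => x
      | none => ("", [])    -- unreachable under Pre_ (Source B returns None on an empty dict)

def pvAltLoop (l : List pvP) (hi lo be : Option pvP × Int) : pvP :=
  match l with
  | [] => pvFinish hi lo be
  | (k, s) :: t =>
    let v := pvGetV s
    if v = -1 then (k, s)
    else pvAltLoop t (pvStepHi hi (k, s)) (pvStepLo lo (k, s)) (pvStepBe be (k, s))

def pick_interesting_py_alt (sv : List (String × List (String × Int))) : String × (List (String × Int)) :=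
  pvAltLoop sv (none, 0) (none, 0) (none, 0)

-- ===== PRECONDITION & SPEC =====
-- Pre_ excludes the empty dict (Python's max raises ValueError there, and Source B returns None),
-- inner dicts without a "value" key (KeyError), and association lists with duplicate keys,
-- which do not represent a Python dict (a dict literal collapses them).
def Pre_pick_interesting_py (sv : List (String × List (String × Int))) : Prop :=
  sv ≠ [] ∧ (sv.map Prod.fst).Nodup ∧
  ∀ p ∈ sv, "value" ∈ p.2.map Prod.fst ∧ (p.2.map Prod.fst).Nodup
instance (sv : List (String × List (String × Int))) : Decidable (Pre_pick_interesting_py sv) := by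
  unfold Pre_pick_interesting_py; infer_instance

def pvWitness_pick_interesting_py : (List (String × List (String × Int))) :=
  [("hp", [("value", 5)]), ("mp", [("value", 1200)])]

def Spec_pick_interesting_py (sv : List (String × List (String × Int))) (out : String × (List (String × Int))) : Prop := out = pick_interesting_py_alt sv
instance (sv : List (String × List (String × Int))) (out : String × (List (String × Int))) : Decidable (Spec_pick_interesting_py sv out) := by unfold Spec_pick_interesting_py; infer_instance

-- ===== CLAIM (what is proved, stated in full; the proofs are below) =====
def Claim_equal_pick_interesting_py : Prop := ∀ (sv : List (String × List (String × Int))), Dom_pick_interesting_py sv → Pre_pick_interesting_py sv → Spec_pick_interesting_py sv (pick_interesting_py sv)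

-- ===== LEMMAS AND PROOFS =====

-- the witness satisfies Dom and Pre
theorem pvWitness_ok :
    Dom_pick_interesting_py pvWitness_pick_interesting_py ∧
    Pre_pick_interesting_py pvWitness_pick_interesting_py := by decide

-- if some element's value is -1, B's loop returns the first such element
theorem pvAltLoop_find (l : List pvP) (p : pvP)
    (h : l.find? (fun p => pvGetV p.2 == -1) = some p) :
    ∀ hi lo be, pvAltLoop l hi lo be = p := by
  induction l with
  | nil => simp at h
  | cons q t ih =>
    intro hi lo be
    rcases q with ⟨k, s⟩
    rw [List.find?_cons] at h
    by_cases hv : pvGetV s = -1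
    · have hb : (pvGetV s == -1) = true := by simpa using hv
      simp [hb] at h
      simp [pvAltLoop, hv, h]
    · have hb : (pvGetV s == -1) = false := by simpa using hv
      simp [hb] at h
      simp [pvAltLoop, hv]
      exact ih h _ _ _

-- if no element's value is -1, B's loop is the three folds followed by pvFinish
theorem pvAltLoop_folds (l : List pvP) (h : ∀ p ∈ l, pvGetV p.2 ≠ -1) :
    ∀ hi lo be, pvAltLoop l hi lo be =
      pvFinish (l.foldl pvStepHi hi) (l.foldl pvStepLo lo) (l.foldl pvStepBe be) := by
  induction l with
  | nil => intro hi lo be; rfl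
  | cons q t ih =>
    intro hi lo be
    rcases q with ⟨k, s⟩
    have hv : pvGetV s ≠ -1 := h (k, s) (by simp)
    simp only [pvAltLoop, List.foldl_cons, if_neg hv]
    exact ih (fun p hp => h p (by simp [hp])) _ _ _

-- running strict-max fold with a seeded candidate is A's first-max fold
theorem pvUpdMax_some (l : List pvP) :
    ∀ b : pvP, l.foldl (fun c p => pvUpdMax c p (pvGetV p.2)) (some b, pvGetV b.2) =
      (some (l.foldl pvMaxStep b), pvGetV (l.foldl pvMaxStep b).2) := by
  induction l with
  | nil => intro b; rfl
  | cons q t ih =>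
    intro b
    have hstep : pvUpdMax (some b, pvGetV b.2) q (pvGetV q.2) =
        (some (pvMaxStep b q), pvGetV (pvMaxStep b q).2) := by
      by_cases hlt : pvGetV b.2 < pvGetV q.2 <;> simp [pvUpdMax, pvMaxStep, hlt]
    simp only [List.foldl_cons, hstep]
    exact ih (pvMaxStep b q)

theorem pvUpdMin_some (l : List pvP) :
    ∀ b : pvP, l.foldl (fun c p => pvUpdMin c p (pvGetV p.2)) (some b, pvGetV b.2) =
      (some (l.foldl pvMinStep b), pvGetV (l.foldl pvMinStep b).2) := by
  induction l with
  | nil => intro b; rfl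
  | cons q t ih =>
    intro b
    have hstep : pvUpdMin (some b, pvGetV b.2) q (pvGetV q.2) =
        (some (pvMinStep b q), pvGetV (pvMinStep b q).2) := by
      by_cases hlt : pvGetV q.2 < pvGetV b.2 <;> simp [pvUpdMin, pvMinStep, hlt]
    simp only [List.foldl_cons, hstep]
    exact ih (pvMinStep b q)

-- from the empty candidate, the strict-max fold returns the first maximum of the list
theorem pvUpdMax_none (l : List pvP) :
    l.foldl (fun c p => pvUpdMax c p (pvGetV p.2)) (none, 0) =
      match l with
      | [] => (none, 0)
      | h :: t => (some (t.foldl pvMaxStep h), pvGetV (t.foldl pvMaxStep h).2) := by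
  cases l with
  | nil => rfl
  | cons q t =>
    have h0 : pvUpdMax (none, 0) q (pvGetV q.2) = (some q, pvGetV q.2) := by
      simp [pvUpdMax]
    simp only [List.foldl_cons, h0]
    exact pvUpdMax_some t q

theorem pvUpdMin_none (l : List pvP) :
    l.foldl (fun c p => pvUpdMin c p (pvGetV p.2)) (none, 0) =
      match l with
      | [] => (none, 0)
      | h :: t => (some (t.foldl pvMinStep h), pvGetV (t.foldl pvMinStep h).2) := by
  cases l with
  | nil => rfl
  | cons q t =>
    have h0 : pvUpdMin (none, 0) q (pvGetV q.2) = (some q, pvGetV q.2) := by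
      simp [pvUpdMin]
    simp only [List.foldl_cons, h0]
    exact pvUpdMin_some t q

-- the hi fold is the max fold over A's highs filter
theorem foldHi_eq_filter (l : List pvP) (c : Option pvP × Int) :
    l.foldl pvStepHi c =
      (l.filter (fun p => decide (1000 ≤ pvGetV p.2))).foldl
        (fun c p => pvUpdMax c p (pvGetV p.2)) c := by
  rw [List.foldl_filter]
  apply PySem.List.foldl_congr_mem
  intro c p _
  simp only [pvStepHi]
  by_cases h : 1000 ≤ pvGetV p.2 <;> simp [h]

-- when no value is ≥ 1000, the lo fold is the min fold over A's lows filter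
theorem foldLo_eq_filter (l : List pvP) (c : Option pvP × Int)
    (hno : ∀ p ∈ l, ¬ (1000 ≤ pvGetV p.2)) :
    l.foldl pvStepLo c =
      (l.filter (fun p => decide (pvGetV p.2 ≤ 30))).foldl
        (fun c p => pvUpdMin c p (pvGetV p.2)) c := by
  rw [List.foldl_filter]
  apply PySem.List.foldl_congr_mem
  intro c p hp
  simp only [pvStepLo]
  rw [if_neg (hno p hp)]
  by_cases h : pvGetV p.2 ≤ 30 <;> simp [h]

-- the be fold is the unfiltered max fold
theorem foldBe_eq (l : List pvP) (c : Option pvP × Int) :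
    l.foldl pvStepBe c = l.foldl (fun c p => pvUpdMax c p (pvGetV p.2)) c := rfl

theorem pick_agree (sv : List pvP) : pick_interesting_py sv = pick_interesting_py_alt sv := by
  unfold pick_interesting_py pick_interesting_py_alt
  cases hf : sv.find? (fun p => pvGetV p.2 == -1) with
  | some p => simp [pvAltLoop_find sv p hf]
  | none =>
    have hno1 : ∀ p ∈ sv, pvGetV p.2 ≠ -1 := by
      intro p hp
      have := List.find?_eq_none.mp hf p hp
      simpa using this
    rw [pvAltLoop_folds sv hno1]
    rw [foldHi_eq_filter, foldBe_eq]
    by_cases hhi : sv.filter (fun p => decide (1000 ≤ pvGetV p.2)) = []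
    · -- no high values at all
      have hnoh : ∀ p ∈ sv, ¬ (1000 ≤ pvGetV p.2) := by
        intro p hp h
        have : p ∈ sv.filter (fun p => decide (1000 ≤ pvGetV p.2)) :=
          List.mem_filter.mpr ⟨hp, by simpa using h⟩
        simp [hhi] at this
      rw [foldLo_eq_filter sv _ hnoh]
      simp only [hhi, List.foldl_nil, ne_eq, not_true_eq_false, if_false]
      by_cases hlo : sv.filter (fun p => decide (pvGetV p.2 ≤ 30)) = []
      · -- no low values either: A takes the global max; B's lo candidate stays empty
        simp only [hlo, List.foldl_nil, not_true_eq_false, if_false]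
        rw [pvUpdMax_none]
        cases sv with
        | nil => rfl
        | cons q t => simp [pvFinish, pvArgMax]
      · -- lows nonempty
        simp only [hlo, not_false_eq_true, if_true]
        rw [pvUpdMin_none]
        cases hl : sv.filter (fun p => decide (pvGetV p.2 ≤ 30)) with
        | nil => exact absurd hl hlo
        | cons q t => simp [pvFinish, pvArgMin]
    · -- highs nonempty: B's hi candidate is A's argmax over the filter
      simp only [ne_eq, hhi, not_false_eq_true, if_true]
      rw [pvUpdMax_none]
      cases hl : sv.filter (fun p => decide (1000 ≤ pvGetV p.2)) with
      | nil => exact absurd hl hhi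
      | cons q t => simp [pvFinish, pvArgMax]

-- ===== VERDICT (by name: the statement is the Claim_ definition above) =====
theorem pick_interesting_py_spec : Claim_equal_pick_interesting_py := by
  intro sv _ _
  unfold Spec_pick_interesting_py
  exact pick_agree sv
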